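-- pv_equiv track=rewrite | github.com/EPashkin/examples | replace_patchs.py | get_replacements
-- ===== SOURCE A (Python) =====
-- def get_replacements(crate):
--     temp = ['gtk', 'glib']
--     single = ['gtk', 'gdk', 'gdk-pixbuf', 'gio', 'glib', 'pango', 'pangocairo']
--     if crate in temp:
--         repl_from = '{} = {{ git = "https://github.com/EPashkin/{}" }}'.format(crate, crate)
--         repl_to = '{} = {{ path = ".." }}'.format(crate)
--         return [[repl_from, repl_to]]
--     elif crate in single:
--         repl_from = '{} = {{ git = "https://github.com/gtk-rs/{}" }}'.format(crate, crate)
--         repl_to = '{} = {{ path = ".." }}'.format(crate)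
--         return [[repl_from, repl_to]]
--     elif crate == 'sys':
--         list = []
--         for name in ['glib-sys', 'gobject-sys', 'gio-sys', 'atk-sys', 'gdk-pixbuf-sys',
--                      'pango-sys', 'pangocairo-sys', 'gdk-sys', 'gtk-sys']:
--             repl_from = '{} = {{ git = "https://github.com/EPashkin/rust-gnome-sys" }}'.format(name)
--             repl_to = '{} = {{ path = "../{}" }}'.format(name, name)
--             list.append([repl_from, repl_to])
--         return list
--     elif crate == 'cairo':
--         list = []
--         repl_from = '{}-rs = {{ git = "https://github.com/EPashkin/{}" }}'.format(crate, crate)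
--         repl_to = '{}-rs = {{ path = ".." }}'.format(crate)
--         list.append([repl_from, repl_to])
--         repl_from = '{}-sys-rs = {{ git = "https://github.com/EPashkin/{}" }}'.format(crate, crate)
--         repl_to = '{}-sys-rs = {{ path = "../{}-sys-rs" }}'.format(crate,crate)
--         list.append([repl_from, repl_to])
--         return list
--     else:
--         return None
-- ===== SOURCE B (Python) =====
-- # Data-driven rewrite: one uniform recipe table (crate -> list of (label, git-url, path)
-- # triples) built once, plus a single formatting pass; get_replacements has no branching.
--
-- def _build_recipes():
--     recipes = {}
--     for c in ['gdk', 'gdk-pixbuf', 'gio', 'pango', 'pangocairo']: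
--         recipes[c] = [(c, 'https://github.com/gtk-rs/' + c, '..')]
--     for c in ['gtk', 'glib']:  # temp crates win over the single list in A
--         recipes[c] = [(c, 'https://github.com/EPashkin/' + c, '..')]
--     recipes['sys'] = [(n, 'https://github.com/EPashkin/rust-gnome-sys', '../' + n)
--                       for n in ['glib-sys', 'gobject-sys', 'gio-sys', 'atk-sys',
--                                 'gdk-pixbuf-sys', 'pango-sys', 'pangocairo-sys',
--                                 'gdk-sys', 'gtk-sys']]
--     recipes['cairo'] = [('cairo-rs', 'https://github.com/EPashkin/cairo', '..'),
--                         ('cairo-sys-rs', 'https://github.com/EPashkin/cairo', '../cairo-sys-rs')]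
--     return recipes
--
-- _RECIPES = _build_recipes()
--
--
-- def _entry(label, url, path):
--     return ['{} = {{ git = "{}" }}'.format(label, url),
--             '{} = {{ path = "{}" }}'.format(label, path)]
--
--
-- def get_replacements(crate):
--     recipe = _RECIPES.get(crate)
--     if recipe is None:
--         return None
--     return [_entry(label, url, path) for (label, url, path) in recipe]
-- ===== Notes on version B (the rewrite author's own statement) =====
-- stated objective: idiomatic
-- what changed: Collapses A's if/elif cascade into a uniform data representation: a recipe table mapping every known crate to (label, git-url, path) triples built once, with a single branch-free formatting pass turning the looked-up recipe into the result.
import Mathlib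
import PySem

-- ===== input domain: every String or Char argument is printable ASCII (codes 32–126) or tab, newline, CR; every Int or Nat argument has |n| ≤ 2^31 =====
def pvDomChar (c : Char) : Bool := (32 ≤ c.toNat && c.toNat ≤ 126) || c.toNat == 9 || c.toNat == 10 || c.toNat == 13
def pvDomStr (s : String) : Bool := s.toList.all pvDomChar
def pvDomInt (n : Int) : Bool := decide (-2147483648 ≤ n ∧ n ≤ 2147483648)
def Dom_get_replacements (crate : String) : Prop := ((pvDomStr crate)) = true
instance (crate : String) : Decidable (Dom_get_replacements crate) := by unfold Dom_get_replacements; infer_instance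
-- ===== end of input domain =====

-- B collapses A's if/elif cascade into one recipe table (crate -> (label, url, path) triples)
-- built once, plus a single branch-free formatting pass (idiomatic; same cost).

-- ===== PORT A =====
def get_replacements (crate : String) : Option (List (List String)) :=
  let temp := ["gtk", "glib"]
  let single := ["gtk", "gdk", "gdk-pixbuf", "gio", "glib", "pango", "pangocairo"]
  if crate ∈ temp then
    some [[crate ++ " = { git = \"https://github.com/EPashkin/" ++ crate ++ "\" }",
           crate ++ " = { path = \"..\" }"]]
  else if crate ∈ single then
    some [[crate ++ " = { git = \"https://github.com/gtk-rs/" ++ crate ++ "\" }",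
           crate ++ " = { path = \"..\" }"]]
  else if crate = "sys" then
    -- the Python 'for … list.append' loop, as a fold accumulating the list
    some (["glib-sys", "gobject-sys", "gio-sys", "atk-sys", "gdk-pixbuf-sys",
           "pango-sys", "pangocairo-sys", "gdk-sys", "gtk-sys"].foldl
      (fun acc name =>
        acc ++ [[name ++ " = { git = \"https://github.com/EPashkin/rust-gnome-sys\" }",
                 name ++ " = { path = \"../" ++ name ++ "\" }"]]) [])
  else if crate = "cairo" then
    some ([] ++ [[crate ++ "-rs = { git = \"https://github.com/EPashkin/" ++ crate ++ "\" }",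
                  crate ++ "-rs = { path = \"..\" }"]]
             ++ [[crate ++ "-sys-rs = { git = \"https://github.com/EPashkin/" ++ crate ++ "\" }",
                  crate ++ "-sys-rs = { path = \"../" ++ crate ++ "-sys-rs\" }"]])
  else none

-- ===== PORT B =====
-- _build_recipes: the uniform recipe table, built by the same two insertion loops as Source B
def pvRecipes : PySem.Dict String (List (String × String × String)) :=
  let d := ["gdk", "gdk-pixbuf", "gio", "pango", "pangocairo"].foldl
    (fun d c => d.insert c [(c, "https://github.com/gtk-rs/" ++ c, "..")])
    (PySem.Dict.ofList [])
  let d := ["gtk", "glib"].foldl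
    (fun d c => d.insert c [(c, "https://github.com/EPashkin/" ++ c, "..")]) d
  let d := d.insert "sys"
    (["glib-sys", "gobject-sys", "gio-sys", "atk-sys", "gdk-pixbuf-sys",
      "pango-sys", "pangocairo-sys", "gdk-sys", "gtk-sys"].map
      (fun n => (n, "https://github.com/EPashkin/rust-gnome-sys", "../" ++ n)))
  d.insert "cairo"
    [("cairo-rs", "https://github.com/EPashkin/cairo", ".."),
     ("cairo-sys-rs", "https://github.com/EPashkin/cairo", "../cairo-sys-rs")]

-- _entry: format one recipe triple
def pvEntry (label url path : String) : List String :=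
  [label ++ " = { git = \"" ++ url ++ "\" }",
   label ++ " = { path = \"" ++ path ++ "\" }"]

def get_replacements_alt (crate : String) : Option (List (List String)) :=
  match PySem.Dict.get? pvRecipes crate with
  | none => none
  | some recipe => some (recipe.map (fun t => pvEntry t.1 t.2.1 t.2.2))

-- ===== PRECONDITION & SPEC =====
def Spec_get_replacements (crate : String) (out : Option (List (List String))) : Prop := out = get_replacements_alt crate
instance (crate : String) (out : Option (List (List String))) : Decidable (Spec_get_replacements crate out) := by unfold Spec_get_replacements; infer_instance

-- ===== CLAIM (what is proved, stated in full; the proofs are below) =====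
def Claim_equal_get_replacements : Prop := ∀ (crate : String), Dom_get_replacements crate → Spec_get_replacements crate (get_replacements crate)

-- ===== LEMMAS AND PROOFS =====

-- ===== VERDICT (by name: the statement is the Claim_ definition above) =====
theorem get_replacements_spec : Claim_equal_get_replacements := by
  intro crate _
  unfold Spec_get_replacements
  by_cases h1 : crate = "gtk"; · subst h1; rfl
  by_cases h2 : crate = "glib"; · subst h2; rfl
  by_cases h3 : crate = "gdk"; · subst h3; rfl
  by_cases h4 : crate = "gdk-pixbuf"; · subst h4; rfl
  by_cases h5 : crate = "gio"; · subst h5; rfl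
  by_cases h6 : crate = "pango"; · subst h6; rfl
  by_cases h7 : crate = "pangocairo"; · subst h7; rfl
  by_cases h8 : crate = "sys"; · subst h8; rfl
  by_cases h9 : crate = "cairo"; · subst h9; rfl
  have hpv : pvRecipes = PySem.Dict.mk
      [("gdk", [("gdk", "https://github.com/gtk-rs/gdk", "..")]),
       ("gdk-pixbuf", [("gdk-pixbuf", "https://github.com/gtk-rs/gdk-pixbuf", "..")]),
       ("gio", [("gio", "https://github.com/gtk-rs/gio", "..")]),
       ("pango", [("pango", "https://github.com/gtk-rs/pango", "..")]),
       ("pangocairo", [("pangocairo", "https://github.com/gtk-rs/pangocairo", "..")]),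
       ("gtk", [("gtk", "https://github.com/EPashkin/gtk", "..")]),
       ("glib", [("glib", "https://github.com/EPashkin/glib", "..")]),
       ("sys", [("glib-sys", "https://github.com/EPashkin/rust-gnome-sys", "../glib-sys"),
                ("gobject-sys", "https://github.com/EPashkin/rust-gnome-sys", "../gobject-sys"),
                ("gio-sys", "https://github.com/EPashkin/rust-gnome-sys", "../gio-sys"),
                ("atk-sys", "https://github.com/EPashkin/rust-gnome-sys", "../atk-sys"),
                ("gdk-pixbuf-sys", "https://github.com/EPashkin/rust-gnome-sys", "../gdk-pixbuf-sys"),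
                ("pango-sys", "https://github.com/EPashkin/rust-gnome-sys", "../pango-sys"),
                ("pangocairo-sys", "https://github.com/EPashkin/rust-gnome-sys", "../pangocairo-sys"),
                ("gdk-sys", "https://github.com/EPashkin/rust-gnome-sys", "../gdk-sys"),
                ("gtk-sys", "https://github.com/EPashkin/rust-gnome-sys", "../gtk-sys")]),
       ("cairo", [("cairo-rs", "https://github.com/EPashkin/cairo", ".."),
                  ("cairo-sys-rs", "https://github.com/EPashkin/cairo", "../cairo-sys-rs")])] := by rfl
  have h1' : ¬("gtk" = crate) := fun h => h1 h.symm
  have h2' : ¬("glib" = crate) := fun h => h2 h.symm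
  have h3' : ¬("gdk" = crate) := fun h => h3 h.symm
  have h4' : ¬("gdk-pixbuf" = crate) := fun h => h4 h.symm
  have h5' : ¬("gio" = crate) := fun h => h5 h.symm
  have h6' : ¬("pango" = crate) := fun h => h6 h.symm
  have h7' : ¬("pangocairo" = crate) := fun h => h7 h.symm
  have h8' : ¬("sys" = crate) := fun h => h8 h.symm
  have h9' : ¬("cairo" = crate) := fun h => h9 h.symm
  simp [get_replacements, get_replacements_alt, hpv, PySem.Dict.get?, beq_iff_eq,
        h1, h2, h3, h4, h5, h6, h7, h8, h9, h1', h2', h3', h4', h5', h6', h7', h8', h9']
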